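-- pv_equiv track=rewrite | github.com/cfrant01/bn-sketches-pipeline | attractors_from_traces.py | detect_suffix_cycle
-- ===== SOURCE A (Python) =====
-- from typing import List, Sequence, Tuple
--
-- def detect_suffix_cycle(
--     states: Sequence[Tuple[int, ...]],
--     max_cycle_length: int,
--     min_cycle_repeats: int,
-- ) -> Tuple[Tuple[int, ...], ...] | None:
--     n = len(states)
--     max_len = min(max_cycle_length, n // max(1, min_cycle_repeats))
--     for cycle_len in range(1, max_len + 1):
--         cycle = tuple(states[n - cycle_len : n])
--         ok = True
--         for rep in range(1, min_cycle_repeats):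
--             start = n - cycle_len * (rep + 1)
--             end = n - cycle_len * rep
--             if start < 0 or tuple(states[start:end]) != cycle:
--                 ok = False
--                 break
--         if ok:
--             return cycle
--     return None
-- ===== SOURCE B (Python) =====
-- from typing import Sequence, Tuple
--
--
-- def _z_array(t):
--     # Z-function: z[i] = length of the longest common prefix of t and t[i:],
--     # computed with the standard l/r window.
--     n = len(t)
--     z = [0] * n
--     l = r = 0
--     for i in range(1, n):
--         k = min(r - i, z[i - l]) if i < r else 0
--         while i + k < n and t[k] == t[i + k]:
--             k += 1
--         z[i] = k
--         if i + k > r: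
--             l, r = i, i + k
--     return z
--
--
-- def detect_suffix_cycle(
--     states: Sequence[Tuple[int, ...]],
--     max_cycle_length: int,
--     min_cycle_repeats: int,
-- ) -> Tuple[Tuple[int, ...], ...] | None:
--     # A period p is valid iff the last p*min_cycle_repeats states are p-periodic,
--     # i.e. the reversed trace matches its own shift by p over p*(min_cycle_repeats-1)
--     # positions -- exactly z[p] >= p*(min_cycle_repeats-1) on the reversed trace.
--     n = len(states)
--     max_len = min(max_cycle_length, n // max(1, min_cycle_repeats))
--     t = list(reversed(states))
--     z = _z_array(t)
--     for p in range(1, max_len + 1):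
--         need = p * (min_cycle_repeats - 1)
--         if need <= 0 or z[p] >= need:
--             return tuple(states[n - p:])
--     return None
-- ===== Notes on version B (the rewrite author's own statement) =====
-- stated objective: alternative
-- what changed: A verifies each candidate cycle length by slicing the trace into blocks and comparing every block against the suffix; B reverses the trace once, computes its Z-function (longest common prefix with each shift) with the standard two-pointer pass, and then accepts a candidate length p by the single table lookup z[p] >= p*(min_cycle_repeats-1); it trades A's early-exit block comparisons for one linear preprocessing pass.
import Mathlib
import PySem

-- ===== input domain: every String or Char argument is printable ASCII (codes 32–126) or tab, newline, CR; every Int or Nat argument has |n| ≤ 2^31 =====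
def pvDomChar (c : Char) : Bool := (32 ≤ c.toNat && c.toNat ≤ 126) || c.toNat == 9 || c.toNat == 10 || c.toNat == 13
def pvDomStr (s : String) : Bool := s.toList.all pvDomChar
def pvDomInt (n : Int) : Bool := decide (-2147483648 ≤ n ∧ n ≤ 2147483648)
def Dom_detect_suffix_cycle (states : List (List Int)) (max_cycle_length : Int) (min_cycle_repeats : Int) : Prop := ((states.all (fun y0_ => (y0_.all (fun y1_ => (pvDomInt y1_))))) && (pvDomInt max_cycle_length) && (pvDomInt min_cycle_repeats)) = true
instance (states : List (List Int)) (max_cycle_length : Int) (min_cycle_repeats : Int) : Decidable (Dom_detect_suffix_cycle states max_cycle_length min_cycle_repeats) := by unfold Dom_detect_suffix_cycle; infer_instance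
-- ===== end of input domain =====

-- B replaces A's per-candidate-length block comparisons by one Z-function pass over the
-- reversed trace; each candidate period is then a single table lookup (alternative algorithm).

-- ===== PORT A =====
-- inner loop 'for rep in range(1, min_cycle_repeats): if start < 0 or block != cycle: ok = False; break'
-- (the break only short-circuits; the resulting ok is the conjunction over all reps)
def pvACond (states : List (List Int)) (n p mr : Int) (cycle : List (List Int)) : Bool :=
  (PySem.List.pyRange 1 mr 1).all (fun rep =>
    decide (¬ (n - p * (rep + 1) < 0 ∨
      PySem.List.slice states (some (n - p * (rep + 1))) (some (n - p * rep)) ≠ cycle)))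

-- outer loop 'for cycle_len in range(1, max_len + 1)' with early return
def pvALoop (states : List (List Int)) (n mr : Int) : List Int → Option (List (List Int))
  | [] => none
  | p :: rest =>
      let cycle := PySem.List.slice states (some (n - p)) (some n)
      if pvACond states n p mr cycle then some cycle
      else pvALoop states n mr rest

def detect_suffix_cycle (states : List (List Int)) (max_cycle_length : Int) (min_cycle_repeats : Int) : Option (List (List Int)) :=
  let n : Int := states.length
  let max_len : Int := min max_cycle_length (PySem.Int.floordiv n (max 1 min_cycle_repeats))
  pvALoop states n min_cycle_repeats (PySem.List.pyRange 1 (max_len + 1) 1)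

-- ===== PORT B =====
-- 'while i + k < n and t[k] == t[i + k]: k += 1'
def pvZExt (t : List (List Int)) (i : Nat) (k : Nat) : Nat :=
  if h : i + k < t.length ∧ t[k]? = t[i + k]? then pvZExt t i (k + 1) else k
termination_by t.length - (i + k)
decreasing_by omega

-- one iteration of the Z-function loop body, state (l, r, z)
def pvZStep (t : List (List Int)) (st : Nat × Nat × Array Nat) (i : Nat) : Nat × Nat × Array Nat :=
  let l := st.1
  let r := st.2.1
  let z := st.2.2
  let k0 := if i < r then min (r - i) (z.getD (i - l) 0) else 0
  let k := pvZExt t i k0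
  let z' := z.setIfInBounds i k
  if r < i + k then (i, i + k, z') else (l, r, z')

-- 'z = [0]*n; l = r = 0; for i in range(1, n): …'
def pvZArr (t : List (List Int)) : Array Nat :=
  ((List.range' 1 (t.length - 1)).foldl (pvZStep t) (0, 0, Array.replicate t.length 0)).2.2

-- 'need = p*(min_cycle_repeats-1); need <= 0 or z[p] >= need'
def pvBCond (z : Array Nat) (p mr : Int) : Bool :=
  decide (p * (mr - 1) ≤ 0) || decide (p * (mr - 1) ≤ (z.getD p.toNat 0 : Int))

def pvBLoop (states : List (List Int)) (n mr : Int) (z : Array Nat) : List Int → Option (List (List Int))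
  | [] => none
  | p :: rest =>
      if pvBCond z p mr then some (PySem.List.slice states (some (n - p)) none)
      else pvBLoop states n mr z rest

def detect_suffix_cycle_alt (states : List (List Int)) (max_cycle_length : Int) (min_cycle_repeats : Int) : Option (List (List Int)) :=
  let n : Int := states.length
  let max_len : Int := min max_cycle_length (PySem.Int.floordiv n (max 1 min_cycle_repeats))
  let t := states.reverse
  let z := pvZArr t
  pvBLoop states n min_cycle_repeats z (PySem.List.pyRange 1 (max_len + 1) 1)

-- ===== PRECONDITION & SPEC =====
def Spec_detect_suffix_cycle (states : List (List Int)) (max_cycle_length : Int) (min_cycle_repeats : Int) (out : Option (List (List Int))) : Prop := out = detect_suffix_cycle_alt states max_cycle_length min_cycle_repeats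
instance (states : List (List Int)) (max_cycle_length : Int) (min_cycle_repeats : Int) (out : Option (List (List Int))) : Decidable (Spec_detect_suffix_cycle states max_cycle_length min_cycle_repeats out) := by unfold Spec_detect_suffix_cycle; infer_instance

-- ===== CLAIM (what is proved, stated in full; the proofs are below) =====
def Claim_equal_detect_suffix_cycle : Prop := ∀ (states : List (List Int)) (max_cycle_length : Int) (min_cycle_repeats : Int), Dom_detect_suffix_cycle states max_cycle_length min_cycle_repeats → Spec_detect_suffix_cycle states max_cycle_length min_cycle_repeats (detect_suffix_cycle states max_cycle_length min_cycle_repeats)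

-- ===== LEMMAS AND PROOFS =====

-- 'the first k positions of t match t shifted left by i'
def pvPP (t : List (List Int)) (i k : Nat) : Prop := ∀ j, j < k → t[j]? = t[i + j]?

-- 'the while loop cannot take another step from k'
def pvEX (t : List (List Int)) (i k : Nat) : Prop := ¬ (i + k < t.length ∧ t[k]? = t[i + k]?)

lemma pvZExt_spec (t : List (List Int)) (i : Nat) :
    ∀ k, pvPP t i k → pvPP t i (pvZExt t i k) ∧ pvEX t i (pvZExt t i k) := by
  intro k
  induction k using (pvZExt.induct t i) with
  | case1 k h ih =>
    intro hp
    rw [pvZExt, dif_pos h]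
    exact ih (by
      intro j hj
      rcases Nat.lt_or_ge j k with hjk | hjk
      · exact hp j hjk
      · have : j = k := by omega
        subst this; exact h.2)
  | case2 k h =>
    intro hp
    rw [pvZExt, dif_neg h]
    exact ⟨hp, h⟩

-- loop invariant for the Z-function fold
def pvZInv (t : List (List Int)) (i : Nat) (st : Nat × Nat × Array Nat) : Prop :=
  st.2.2.size = t.length ∧ st.1 ≤ i ∧
  (∀ x, x < st.2.1 - st.1 → t[x]? = t[st.1 + x]?) ∧
  (∀ j, pvPP t j (st.2.2.getD j 0)) ∧
  (∀ j, 1 ≤ j → j < i → pvEX t j (st.2.2.getD j 0))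

lemma pvZStep_inv (t : List (List Int)) (i : Nat) (st : Nat × Nat × Array Nat)
    (hi : 1 ≤ i) (hin : i < t.length) (h : pvZInv t i st) :
    pvZInv t (i + 1) (pvZStep t st i) := by
  obtain ⟨hsz, hli, hbox, hP, hE⟩ := h
  set l := st.1 with hl
  set r := st.2.1 with hr
  set z := st.2.2 with hz
  have hk0 : pvPP t i (if i < r then min (r - i) (z.getD (i - l) 0) else 0) := by
    split_ifs with hir
    · intro j hj
      have hj1 : j < r - i := by omega
      have hj2 : j < z.getD (i - l) 0 := by omega
      have e1 : t[j]? = t[(i - l) + j]? := hP (i - l) j hj2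
      have e2 : t[(i - l) + j]? = t[l + ((i - l) + j)]? := hbox ((i - l) + j) (by omega)
      have e3 : l + ((i - l) + j) = i + j := by omega
      rw [e1, e2, e3]
    · intro j hj; omega
  obtain ⟨hPk, hEk⟩ := pvZExt_spec t i _ hk0
  set k := pvZExt t i (if i < r then min (r - i) (z.getD (i - l) 0) else 0) with hkdef
  have hset : ∀ j, (z.setIfInBounds i k).getD j 0 = if j = i then k else z.getD j 0 := by
    intro j
    by_cases hji : j = i
    · subst hji
      simp [Array.getD, hsz, hin]
    · by_cases hjs : j < z.size
      · simp [Array.getD, hjs, hji, Ne.symm hji]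
      · simp [Array.getD, hjs, hji]
  have hP' : ∀ j, pvPP t j ((z.setIfInBounds i k).getD j 0) := by
    intro j; rw [hset j]
    split_ifs with hji
    · subst hji; exact hPk
    · exact hP j
  have hE' : ∀ j, 1 ≤ j → j < i + 1 → pvEX t j ((z.setIfInBounds i k).getD j 0) := by
    intro j h1 h2; rw [hset j]
    split_ifs with hji
    · subst hji; exact hEk
    · exact hE j h1 (by omega)
  have hres : pvZStep t st i =
      if r < i + k then (i, i + k, z.setIfInBounds i k) else (l, r, z.setIfInBounds i k) := rfl
  rw [hres]
  split_ifs with hrk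
  · refine ⟨?_, ?_, ?_, hP', hE'⟩
    · show (z.setIfInBounds i k).size = t.length
      simp [hsz]
    · show i ≤ i + 1
      omega
    · show ∀ x, x < i + k - i → t[x]? = t[i + x]?
      intro x hx
      exact hPk x (by omega)
  · refine ⟨?_, ?_, hbox, hP', hE'⟩
    · show (z.setIfInBounds i k).size = t.length
      simp [hsz]
    · show l ≤ i + 1
      omega

lemma pvZArr_spec (t : List (List Int)) :
    (∀ j, pvPP t j ((pvZArr t).getD j 0)) ∧
    (∀ j, 1 ≤ j → j < t.length → pvEX t j ((pvZArr t).getD j 0)) := by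
  have base : pvZInv t 1 (0, 0, Array.replicate t.length 0) := by
    refine ⟨by simp, Nat.zero_le 1, ?_, ?_, ?_⟩
    · show ∀ x, x < 0 - 0 → t[x]? = t[0 + x]?
      intro x hx
      omega
    · intro j x hx
      by_cases hj : j < t.length
      · simp [Array.getD, hj] at hx
      · simp [Array.getD, hj] at hx
    · intro j h1 h2
      omega
  have main : ∀ m, 1 + m ≤ t.length →
      pvZInv t (1 + m) ((List.range' 1 m).foldl (pvZStep t) (0, 0, Array.replicate t.length 0)) := by
    intro m
    induction m with
    | zero => intro _; exact base
    | succ q ih =>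
      intro hle
      rw [List.range'_1_concat, List.foldl_append]
      simp only [List.foldl_cons, List.foldl_nil]
      have h := pvZStep_inv t (1 + q) _ (by omega) (by omega) (ih (by omega))
      rw [show 1 + (q + 1) = 1 + q + 1 from by omega]
      exact h
  rcases Nat.eq_zero_or_pos t.length with h0 | hpos
  · constructor
    · intro j x hx
      unfold pvZArr at hx
      simp [h0, Array.getD] at hx
    · intro j h1 h2; omega
  · have := main (t.length - 1) (by omega)
    rw [show 1 + (t.length - 1) = t.length from by omega] at this
    exact ⟨this.2.2.2.1, this.2.2.2.2⟩

-- two equal-length windows of s are equal iff they agree pointwise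
lemma pv_window_eq_iff (s : List (List Int)) (a b q : Nat) :
    ((s.drop a).take q = (s.drop b).take q) ↔ ∀ j, j < q → s[a+j]? = s[b+j]? := by
  rw [List.ext_getElem?_iff]
  constructor
  · intro h j hj
    have := h j
    simpa [List.getElem?_take, List.getElem?_drop, hj] using this
  · intro h j
    by_cases hj : j < q
    · simp [List.getElem?_drop, hj, h j hj]
    · simp [hj]

-- p'-periodicity of the suffix stretch ⇒ every block equals the last block
lemma pv_shift_to_blocks (s : List (List Int)) (p' r : Nat) (hp : 1 ≤ p')
    (hN : p' * r ≤ s.length)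
    (hS : ∀ i, s.length - p' * r ≤ i → i < s.length - p' → s[i]? = s[i + p']?) :
    ∀ rep, 1 ≤ rep → rep < r → ∀ j, j < p' →
      s[s.length - p' * (rep + 1) + j]? = s[s.length - p' + j]? := by
  intro rep
  induction rep with
  | zero => intro h; omega
  | succ k ih =>
    intro _ h2 j hj
    have m1 : p' * (k + 1 + 1) = p' * (k + 1) + p' := by ring
    have m2 : p' * (k + 1) = p' * k + p' := by ring
    have mle : p' * (k + 1 + 1) ≤ p' * r := Nat.mul_le_mul_left p' (by omega)
    have hstep := hS (s.length - p' * (k + 1 + 1) + j) (by omega) (by omega)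
    rw [show s.length - p' * (k + 1 + 1) + j + p' = s.length - p' * (k + 1) + j from by omega] at hstep
    by_cases hk : k = 0
    · subst hk
      rw [show s.length - p' * (0 + 1) + j = s.length - p' + j from by omega] at hstep
      exact hstep
    · exact hstep.trans (ih (by omega) (by omega) j hj)

-- every block equal to the last block ⇒ the suffix stretch is p'-periodic
lemma pv_blocks_to_shift (s : List (List Int)) (p' r : Nat) (hp : 1 ≤ p')
    (hN : p' * r ≤ s.length)
    (hB : ∀ rep, 1 ≤ rep → rep < r → ∀ j, j < p' →
      s[s.length - p' * (rep + 1) + j]? = s[s.length - p' + j]?) :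
    ∀ i, s.length - p' * r ≤ i → i < s.length - p' → s[i]? = s[i + p']? := by
  intro i hi1 hi2
  obtain ⟨q, m, hd, hm⟩ : ∃ q m, s.length - p' - 1 - i = p' * q + m ∧ m < p' :=
    ⟨(s.length - p' - 1 - i) / p', (s.length - p' - 1 - i) % p',
      (Nat.div_add_mod _ _).symm, Nat.mod_lt _ (by omega)⟩
  have e1 : p' * (q + 1) = p' * q + p' := by ring
  have e3 : p' * (q + 1 + 1) = p' * q + 2 * p' := by ring
  have hqr : q + 1 < r := by
    by_contra hcon
    have hmono : p' * r ≤ p' * (q + 1) := Nat.mul_le_mul_left p' (by omega)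
    omega
  have mle2 : p' * (q + 1 + 1) ≤ p' * r := Nat.mul_le_mul_left p' (by omega)
  have h1 := hB (q + 1) (by omega) hqr (p' - 1 - m) (by omega)
  have gi : i = s.length - p' * (q + 1 + 1) + (p' - 1 - m) := by omega
  rw [gi, show s.length - p' * (q + 1 + 1) + (p' - 1 - m) + p'
        = s.length - p' * (q + 1) + (p' - 1 - m) from by omega]
  rcases Nat.eq_zero_or_pos q with hq | hq
  · subst hq
    rw [show s.length - p' * (0 + 1) + (p' - 1 - m) = s.length - p' + (p' - 1 - m) from by omega]
    exact h1
  · exact h1.trans (hB q (by omega) (by omega) (p' - 1 - m) (by omega)).symm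

-- one block comparison of A, characterised at the Nat level
lemma pvA_inner_iff (s : List (List Int)) (p rep : Int) (hp : 1 ≤ p) (hrep : 1 ≤ rep)
    (hle : p * (rep + 1) ≤ (s.length : Int)) :
    (PySem.List.slice s (some ((s.length : Int) - p * (rep + 1))) (some ((s.length : Int) - p * rep)) =
     PySem.List.slice s (some ((s.length : Int) - p)) (some (s.length : Int))) ↔
    (∀ j, j < p.toNat → s[s.length - p.toNat * (rep.toNat + 1) + j]? = s[s.length - p.toNat + j]?) := by
  have hd0 : 0 ≤ p * rep := mul_nonneg (by omega) (by omega)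
  have e2 : p * (rep + 1) = p * rep + p := by ring
  have e1 : ((p.toNat * (rep.toNat + 1) : Nat) : Int) = p * rep + p := by
    push_cast [Int.toNat_of_nonneg (show (0:Int) ≤ p by omega),
               Int.toNat_of_nonneg (show (0:Int) ≤ rep by omega)]
    ring
  rw [PySem.List.slice_toNat s (by omega) (by omega),
      PySem.List.slice_toNat s (by omega) (by omega)]
  rw [show ((s.length : Int) - p * rep).toNat - ((s.length : Int) - p * (rep + 1)).toNat = p.toNat from by omega,
      show ((s.length : Int)).toNat - ((s.length : Int) - p).toNat = p.toNat from by omega,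
      show ((s.length : Int) - p * (rep + 1)).toNat = s.length - p.toNat * (rep.toNat + 1) from by omega,
      show ((s.length : Int) - p).toNat = s.length - p.toNat from by omega]
  exact pv_window_eq_iff s _ _ _

-- A's per-p condition, characterised at the Nat level (case 2 <= mr)
lemma pvACond_iff (s : List (List Int)) (p mr : Int) (hp : 1 ≤ p) (hmr : 2 ≤ mr)
    (hn : p * mr ≤ (s.length : Int)) :
    pvACond s (s.length : Int) p mr (PySem.List.slice s (some ((s.length : Int) - p)) (some (s.length : Int))) = true ↔
      ∀ rep, 1 ≤ rep → rep < mr.toNat → ∀ j, j < p.toNat →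
        s[s.length - p.toNat * (rep + 1) + j]? = s[s.length - p.toNat + j]? := by
  unfold pvACond
  rw [List.all_eq_true]
  constructor
  · intro h rep h1 h2 j hj
    have hmem : ((rep : Nat) : Int) ∈ PySem.List.pyRange 1 mr 1 := by
      rw [PySem.List.mem_pyRange_one]; omega
    have hh := h _ hmem
    rw [decide_eq_true_eq] at hh
    push Not at hh
    have hle : p * ((rep : Int) + 1) ≤ (s.length : Int) := by
      calc p * ((rep : Int) + 1) ≤ p * mr := by
            apply mul_le_mul_of_nonneg_left (by omega) (by omega)
        _ ≤ _ := hn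
    have := (pvA_inner_iff s p rep hp (by omega) hle).mp hh.2 j hj
    simpa using this
  · intro h x hmem
    rw [PySem.List.mem_pyRange_one] at hmem
    rw [decide_eq_true_eq]
    push Not
    have hle : p * (x + 1) ≤ (s.length : Int) := by
      calc p * (x + 1) ≤ p * mr := by
            apply mul_le_mul_of_nonneg_left (by omega) (by omega)
        _ ≤ _ := hn
    refine ⟨by omega, ?_⟩
    apply (pvA_inner_iff s p x hp hmem.1 hle).mpr
    intro j hj
    exact h x.toNat (by omega) (by omega) j hj

-- the shift condition on s, transported to the reversed list
lemma pv_shift_reverse (s : List (List Int)) (p' r : Nat) (hp : 1 ≤ p')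
    (hN : p' * r ≤ s.length) (hr : 1 ≤ r) :
    ((∀ i, s.length - p' * r ≤ i → i < s.length - p' → s[i]? = s[i + p']?) ↔
      pvPP s.reverse p' (p' * (r - 1))) := by
  have hrev : ∀ j, j < s.length → s.reverse[j]? = s[s.length - 1 - j]? := by
    intro j hj
    exact List.getElem?_reverse (by simpa using hj)
  have hrm : p' * (r - 1) + p' = p' * r := by
    have : p' * (r - 1) + p' = p' * (r - 1 + 1) := by ring
    rw [this, show r - 1 + 1 = r from by omega]
  constructor
  · intro h j hj
    have hjn : j < s.length := by omega
    have hpjn : p' + j < s.length := by omega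
    rw [hrev j hjn, hrev (p' + j) hpjn]
    have := h (s.length - 1 - (p' + j)) (by omega) (by omega)
    rw [show s.length - 1 - (p' + j) + p' = s.length - 1 - j from by omega] at this
    exact this.symm
  · intro h i hi1 hi2
    have hj : s.length - 1 - p' - i < p' * (r - 1) := by omega
    have := h (s.length - 1 - p' - i) hj
    rw [hrev _ (by omega), hrev _ (by omega)] at this
    rw [show s.length - 1 - (s.length - 1 - p' - i) = i + p' from by omega,
        show s.length - 1 - (p' + (s.length - 1 - p' - i)) = i from by omega] at this
    exact this.symm

-- the Z-table lookup decides the shift condition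
lemma pv_z_threshold (s : List (List Int)) (p' need : Nat) (hp : 1 ≤ p')
    (hpn : p' < s.length) (hneed : need ≤ s.length - p') :
    (need ≤ (pvZArr s.reverse).getD p' 0 ↔ pvPP s.reverse p' need) := by
  obtain ⟨hPall, hEall⟩ := pvZArr_spec s.reverse
  constructor
  · intro h j hj
    exact hPall p' j (by omega)
  · intro h
    by_contra hcon
    have hz : (pvZArr s.reverse).getD p' 0 < need := by omega
    have hE := hEall p' hp (by simpa using hpn)
    unfold pvEX at hE
    push Not at hE
    have hlt : p' + (pvZArr s.reverse).getD p' 0 < s.reverse.length := by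
      simp only [List.length_reverse]; omega
    exact (hE hlt) (h _ hz)

-- the two per-p conditions agree for every admissible p
lemma pv_cond_eq (s : List (List Int)) (p mr : Int) (hp : 1 ≤ p)
    (hn : p * max 1 mr ≤ (s.length : Int)) :
    pvACond s (s.length : Int) p mr (PySem.List.slice s (some ((s.length : Int) - p)) (some (s.length : Int))) =
      pvBCond (pvZArr s.reverse) p mr := by
  rcases le_or_gt mr 1 with hmr | hmr
  · unfold pvACond pvBCond
    rw [PySem.List.pyRange_one_eq_nil (by omega : mr ≤ 1)]
    have : p * (mr - 1) ≤ 0 := mul_nonpos_of_nonneg_of_nonpos (by omega) (by omega)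
    simp [this]
  · have hx : max 1 mr = mr := by omega
    rw [hx] at hn
    have hmr2 : (2:Int) ≤ mr := by omega
    have hpm : ((p.toNat * mr.toNat : Nat) : Int) = p * mr := by
      push_cast
      rw [Int.toNat_of_nonneg, Int.toNat_of_nonneg] <;> omega
    have hneedpos : 0 < p * (mr - 1) := by
      apply mul_pos <;> omega
    have hneedc : ((p.toNat * (mr.toNat - 1) : Nat) : Int) = p * (mr - 1) := by
      push_cast [Int.toNat_of_nonneg (show (0:Int) ≤ p by omega)]
      rw [show ((mr.toNat - 1 : Nat) : Int) = mr - 1 from by omega]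
    have hsplit : p * mr = p * (mr - 1) + p := by ring
    have h2p : p * 2 ≤ p * mr := mul_le_mul_of_nonneg_left (by omega) (by omega)
    have hpn : p.toNat < s.length := by omega
    have hBC : pvBCond (pvZArr s.reverse) p mr = true ↔
        p.toNat * (mr.toNat - 1) ≤ (pvZArr s.reverse).getD p.toNat 0 := by
      unfold pvBCond
      rw [Bool.or_eq_true, decide_eq_true_eq, decide_eq_true_eq]
      constructor
      · rintro (h | h)
        · omega
        · omega
      · intro h; right; omega
    rw [Bool.eq_iff_iff, hBC, pvACond_iff s p mr hp hmr2 hn,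
        pv_z_threshold s p.toNat (p.toNat * (mr.toNat - 1)) (by omega) hpn (by omega),
        ← pv_shift_reverse s p.toNat mr.toNat (by omega) (by omega) (by omega)]
    constructor
    · exact pv_blocks_to_shift s p.toNat mr.toNat (by omega) (by omega)
    · exact pv_shift_to_blocks s p.toNat mr.toNat (by omega) (by omega)

-- both returned slices are the same suffix
lemma pv_slice_to_len (s : List (List Int)) (a : Int) (h0 : 0 ≤ a) :
    PySem.List.slice s (some a) (some (s.length : Int)) = PySem.List.slice s (some a) none := by
  rw [PySem.List.slice_toNat s h0 (by positivity), PySem.List.slice_from s h0]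
  apply List.take_of_length_le
  simp

lemma pv_loop_eq (s : List (List Int)) (mr : Int) (l : List Int)
    (h : ∀ p ∈ l, 1 ≤ p ∧ p * max 1 mr ≤ (s.length : Int)) :
    pvALoop s (s.length : Int) mr l = pvBLoop s (s.length : Int) mr (pvZArr s.reverse) l := by
  induction l with
  | nil => rfl
  | cons p rest ih =>
    obtain ⟨hp1, hp2⟩ := h p List.mem_cons_self
    have hple : p ≤ (s.length : Int) := by
      have h1 : p * 1 ≤ p * max 1 mr :=
        mul_le_mul_of_nonneg_left (le_max_left 1 mr) (by omega)
      omega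
    simp only [pvALoop, pvBLoop]
    rw [pv_cond_eq s p mr hp1 hp2]
    by_cases hc : pvBCond (pvZArr s.reverse) p mr
    · simp [hc, pv_slice_to_len s ((s.length : Int) - p) (by omega)]
    · simp [hc, ih (fun q hq => h q (List.mem_cons_of_mem _ hq))]

-- ===== VERDICT (by name: the statement is the Claim_ definition above) =====
theorem detect_suffix_cycle_spec : Claim_equal_detect_suffix_cycle := by
  intro states mcl mr _
  unfold Spec_detect_suffix_cycle detect_suffix_cycle detect_suffix_cycle_alt
  apply pv_loop_eq
  intro p hpmem
  rw [PySem.List.mem_pyRange_one] at hpmem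
  have hmx : (0:Int) < max 1 mr := by omega
  have hfl : p ≤ PySem.Int.floordiv (states.length : Int) (max 1 mr) := by omega
  exact ⟨hpmem.1, (PySem.Int.le_floordiv_iff_mul_le hmx).mp hfl⟩
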